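-- pv_equiv track=rewrite | github.com/jbrick2070/ComfyUI-HYRadio | nodes/llm_environment_bridge.py | _fallback_visual
-- ===== SOURCE A (Python) =====
-- def _fallback_visual(scene_text):
--     """Generate a visual prompt using keyword analysis when LLM is unavailable."""
--     spatial = "equirectangular 360 panorama, massive scale, deep environmental spatial depth, no extreme close-up foreground objects, unobstructed distant horizon"
--
--     text_lower = scene_text.lower()
--     if any(w in text_lower for w in ["dark", "tunnel", "narrow", "emergency", "escape"]):
--         style = "dramatic chiaroscuro lighting, Ridley Scott aesthetic, deep shadows"
--     elif any(w in text_lower for w in ["lab", "science", "experiment", "mutation", "contain"]):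
--         style = "clinical cold fluorescent lighting, Denis Villeneuve color palette, sterile atmosphere"
--     elif any(w in text_lower for w in ["control", "command", "station", "facility"]):
--         style = "warm amber instrument glow, Kubrickian symmetry, technological grandeur"
--     else:
--         style = "cinematic volumetric lighting, atmospheric haze, moody ambience"
--
--     return f"A sweeping environmental landscape: {scene_text} | {spatial}, {style}, masterpiece, 8k resolution, photorealistic, highly detailed"
-- ===== SOURCE B (Python) =====
-- _STYLES = [
--     "dramatic chiaroscuro lighting, Ridley Scott aesthetic, deep shadows",
--     "clinical cold fluorescent lighting, Denis Villeneuve color palette, sterile atmosphere",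
--     "warm amber instrument glow, Kubrickian symmetry, technological grandeur",
--     "cinematic volumetric lighting, atmospheric haze, moody ambience",
-- ]
--
-- # flat keyword -> rank (priority) list; rank 3 = default style
-- _KEYWORDS = (
--     [(k, 0) for k in ("dark", "tunnel", "narrow", "emergency", "escape")]
--     + [(k, 1) for k in ("lab", "science", "experiment", "mutation", "contain")]
--     + [(k, 2) for k in ("control", "command", "station", "facility")]
-- )
--
-- _SPATIAL = "equirectangular 360 panorama, massive scale, deep environmental spatial depth, no extreme close-up foreground objects, unobstructed distant horizon"
--
--
-- def _fallback_visual(scene_text):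
--     """Generate a visual prompt using keyword analysis when LLM is unavailable."""
--     t = scene_text.lower()
--     best = 3
--     for kw, rank in _KEYWORDS:
--         if kw in t:
--             best = min(best, rank)
--     style = _STYLES[best]
--     return f"A sweeping environmental landscape: {scene_text} | {_SPATIAL}, {style}, masterpiece, 8k resolution, photorealistic, highly detailed"
-- ===== Notes on version B (the rewrite author's own statement) =====
-- stated objective: alternative
-- what changed: Replaces the if/elif group dispatch with a single pass over a flat keyword->rank list that accumulates the minimum matching rank, then indexes a style table with it (rank 3 = default).
import Mathlib
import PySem

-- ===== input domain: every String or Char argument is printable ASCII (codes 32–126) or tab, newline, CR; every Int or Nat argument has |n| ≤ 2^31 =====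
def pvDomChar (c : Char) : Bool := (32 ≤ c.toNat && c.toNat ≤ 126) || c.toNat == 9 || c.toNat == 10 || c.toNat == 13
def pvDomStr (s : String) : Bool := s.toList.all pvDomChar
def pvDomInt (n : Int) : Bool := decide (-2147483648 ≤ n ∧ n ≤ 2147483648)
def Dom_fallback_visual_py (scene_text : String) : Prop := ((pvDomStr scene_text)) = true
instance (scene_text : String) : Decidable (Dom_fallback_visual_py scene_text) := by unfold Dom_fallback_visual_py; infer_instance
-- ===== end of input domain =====

-- B replaces A's if/elif group dispatch by a one-pass minimum-rank fold over a flat keyword->rank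
-- list, then indexes a style table with the accumulated rank (alternative, same cost).

-- ===== PORT A =====
def fallback_visual_py (scene_text : String) : String :=
  let spatial := "equirectangular 360 panorama, massive scale, deep environmental spatial depth, no extreme close-up foreground objects, unobstructed distant horizon"
  let text_lower := PySem.Str.lower scene_text
  let style :=
    if ["dark", "tunnel", "narrow", "emergency", "escape"].any
        (fun w => PySem.Str.isIn w text_lower) then
      "dramatic chiaroscuro lighting, Ridley Scott aesthetic, deep shadows"
    else if ["lab", "science", "experiment", "mutation", "contain"].any
        (fun w => PySem.Str.isIn w text_lower) then
      "clinical cold fluorescent lighting, Denis Villeneuve color palette, sterile atmosphere"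
    else if ["control", "command", "station", "facility"].any
        (fun w => PySem.Str.isIn w text_lower) then
      "warm amber instrument glow, Kubrickian symmetry, technological grandeur"
    else
      "cinematic volumetric lighting, atmospheric haze, moody ambience"
  "A sweeping environmental landscape: " ++ scene_text ++ " | " ++ spatial ++ ", " ++ style ++ ", masterpiece, 8k resolution, photorealistic, highly detailed"

-- ===== PORT B =====
def pvStyles : List String :=
  [ "dramatic chiaroscuro lighting, Ridley Scott aesthetic, deep shadows",
    "clinical cold fluorescent lighting, Denis Villeneuve color palette, sterile atmosphere",
    "warm amber instrument glow, Kubrickian symmetry, technological grandeur",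
    "cinematic volumetric lighting, atmospheric haze, moody ambience" ]

def pvKeywords : List (String × Nat) :=
  (["dark", "tunnel", "narrow", "emergency", "escape"].map (fun k => (k, 0)))
  ++ (["lab", "science", "experiment", "mutation", "contain"].map (fun k => (k, 1)))
  ++ (["control", "command", "station", "facility"].map (fun k => (k, 2)))

def pvSpatial : String := "equirectangular 360 panorama, massive scale, deep environmental spatial depth, no extreme close-up foreground objects, unobstructed distant horizon"

def fallback_visual_py_alt (scene_text : String) : String :=
  let t := PySem.Str.lower scene_text
  let best := pvKeywords.foldl
    (fun best p => if PySem.Str.isIn p.1 t then min best p.2 else best) 3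
  -- _STYLES[best]: best is always in 0..3, so plain getD is exact here
  let style := pvStyles.getD best ""
  "A sweeping environmental landscape: " ++ scene_text ++ " | " ++ pvSpatial ++ ", " ++ style ++ ", masterpiece, 8k resolution, photorealistic, highly detailed"

-- ===== PRECONDITION & SPEC =====
def Spec_fallback_visual_py (scene_text : String) (out : String) : Prop := out = fallback_visual_py_alt scene_text
instance (scene_text : String) (out : String) : Decidable (Spec_fallback_visual_py scene_text out) := by unfold Spec_fallback_visual_py; infer_instance

-- ===== CLAIM =====
def Claim_equal_fallback_visual_py : Prop := ∀ (scene_text : String), Dom_fallback_visual_py scene_text → Spec_fallback_visual_py scene_text (fallback_visual_py scene_text)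

-- ===== LEMMAS AND PROOFS =====

-- folding B's min-rank step over a block of keywords sharing one rank g equals
-- "min with g if any keyword of the block matches"
theorem pv_fold_block (c : String → Bool) (g : Nat) :
    ∀ (ks : List String) (m : Nat),
      List.foldl (fun (best : Nat) (p : String × Nat) => if c p.1 then min best p.2 else best)
        m (ks.map (fun k => (k, g)))
      = if ks.any c then min m g else m := by
  intro ks
  induction ks with
  | nil => intro m; simp
  | cons k rest ih =>
    intro m
    by_cases h : c k = true <;> simp [h, ih] <;> split <;> omega

-- ===== VERDICT =====
theorem fallback_visual_py_spec : Claim_equal_fallback_visual_py := by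
  intro s _
  unfold Spec_fallback_visual_py fallback_visual_py fallback_visual_py_alt pvKeywords pvStyles pvSpatial
  simp only [List.foldl_append,
    pv_fold_block (fun w => PySem.Str.isIn w (PySem.Str.lower s))]
  cases h1 : (["dark", "tunnel", "narrow", "emergency", "escape"] : List String).any
      (fun w => PySem.Str.isIn w (PySem.Str.lower s)) <;>
  cases h2 : (["lab", "science", "experiment", "mutation", "contain"] : List String).any
      (fun w => PySem.Str.isIn w (PySem.Str.lower s)) <;>
  cases h3 : (["control", "command", "station", "facility"] : List String).any
      (fun w => PySem.Str.isIn w (PySem.Str.lower s)) <;>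
  simp
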